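-- pv_equiv track=rewrite | github.com/Aman0509/Python_Codes | Practice_Area/cisco.py | weightCapacity
-- ===== SOURCE A (Python) =====
-- from itertools import permutations as pe
--
-- def weightCapacity(weights, maxCapacity):
--     '''
--     https://leetcode.com/discuss/interview-question/858129/roblox-oa-new-grad-2021
--     '''
--     n = len(weights)
--     c = 0
--     temp_arr = []
--     while c <= n:
--         temp = pe(weights, c)
--         for i in list(temp):
--             if sum(i) == maxCapacity:
--                 return sum(i)
--             elif sum(i) < maxCapacity:
--                 temp_arr.append(sum(i))
--         c += 1
--     return max(temp_arr)
-- ===== SOURCE B (Python) =====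
-- def weightCapacity(weights, maxCapacity):
--     # Subset-sum over reachable sums: one pass, no permutation enumeration.
--     sums = {0}
--     for w in weights:
--         sums = sums | {s + w for s in sums}
--     return max(s for s in sums if s <= maxCapacity)
-- ===== Notes on version B (the rewrite author's own statement) =====
-- stated objective: alternative
-- what changed: Replaces the enumeration of all permutations of every length with a single pass maintaining the set of reachable subset sums and taking the maximum of those <= maxCapacity (intended as faster; a timing run saw A time out at n=16 while B returned, but could not verify a ratio).
import Mathlib
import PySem

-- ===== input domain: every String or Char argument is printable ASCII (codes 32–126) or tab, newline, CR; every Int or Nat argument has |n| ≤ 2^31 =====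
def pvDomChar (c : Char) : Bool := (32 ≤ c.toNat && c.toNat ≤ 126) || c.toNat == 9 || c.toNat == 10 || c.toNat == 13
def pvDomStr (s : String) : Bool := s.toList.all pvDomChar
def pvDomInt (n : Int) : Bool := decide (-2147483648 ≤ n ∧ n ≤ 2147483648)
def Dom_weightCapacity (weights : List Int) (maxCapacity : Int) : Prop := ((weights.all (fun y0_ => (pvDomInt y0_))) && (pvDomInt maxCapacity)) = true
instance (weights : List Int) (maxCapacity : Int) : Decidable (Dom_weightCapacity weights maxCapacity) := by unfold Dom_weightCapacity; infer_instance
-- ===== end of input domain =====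

-- B replaces A's permutation enumeration with one pass over the set of reachable subset sums (an alternative algorithm; return value proved equal under Pre_).


-- ===== PORT A =====
-- inner 'for i in list(temp): if sum(i)==maxCapacity: return …; elif sum(i)<maxCapacity: temp_arr.append(…)'
def innerA (C : Int) : List (List Int) → List Int → Sum Int (List Int)
  | [], acc => .inr acc
  | p :: ps, acc =>
    if p.sum = C then .inl p.sum
    else if p.sum < C then innerA C ps (acc ++ [p.sum])
    else innerA C ps acc

-- outer 'while c <= n' loop: k = number of remaining iterations (c = c, c+1, …)
def outerA (ws : List Int) (C : Int) : Nat → Nat → List Int → Sum Int (List Int)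
  | _, 0, acc => .inr acc
  | c, k+1, acc =>
    match innerA C (PySem.List.permutations ws c) acc with
    | .inl v => .inl v
    | .inr acc' => outerA ws C (c+1) k acc'

def weightCapacity (weights : List Int) (maxCapacity : Int) : Int :=
  match outerA weights maxCapacity 0 (weights.length + 1) [] with
  | .inl v => v
  | .inr acc => (PySem.List.max? acc (fun x => x)).getD 0   -- Python max([]) raises ValueError: outside Pre_

-- ===== PORT B =====
def weightCapacity_alt (weights : List Int) (maxCapacity : Int) : Int :=
  let sums := weights.foldl (fun s w => PySem.Set.union s (s.map (fun x => x + w))) (PySem.Set.ofList [0])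
  let eligible := sums.filter (fun x => decide (x ≤ maxCapacity))
  (PySem.List.max? eligible (fun x => x)).getD 0   -- Python max of empty raises ValueError: outside Pre_

-- ===== PRECONDITION & SPEC =====
-- Pre_ excludes exactly the inputs where Python A raises (ValueError from max([]) when no subset
-- sum is ≤ maxCapacity); B raises ValueError there too. The least subset sum is the sum of the
-- negative weights, so this is the closed-form condition.
def Pre_weightCapacity (weights : List Int) (maxCapacity : Int) : Prop :=
  (weights.filter (fun w => w < 0)).sum ≤ maxCapacity
instance (weights : List Int) (maxCapacity : Int) : Decidable (Pre_weightCapacity weights maxCapacity) := by unfold Pre_weightCapacity; infer_instance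

def pvWitness_weightCapacity : List Int × Int := ([1, 3, -2], 4)

def Spec_weightCapacity (weights : List Int) (maxCapacity : Int) (out : Int) : Prop := out = weightCapacity_alt weights maxCapacity
instance (weights : List Int) (maxCapacity : Int) (out : Int) : Decidable (Spec_weightCapacity weights maxCapacity out) := by unfold Spec_weightCapacity; infer_instance

-- ===== CLAIM (what is proved, stated in full; the proofs are below) =====
def Claim_equal_weightCapacity : Prop := ∀ (weights : List Int) (maxCapacity : Int), Dom_weightCapacity weights maxCapacity → Pre_weightCapacity weights maxCapacity → Spec_weightCapacity weights maxCapacity (weightCapacity weights maxCapacity)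

-- ===== LEMMAS AND PROOFS =====

-- the flat list of all permutation sums A scans, for c = c0, c0+1, …, c0+k-1
def sumsFrom (ws : List Int) (c0 k : Nat) : List Int :=
  (List.range' c0 k).flatMap (fun j => (PySem.List.permutations ws j).map (fun p => p.sum))

lemma innerA_eq (C : Int) (ps : List (List Int)) (acc : List Int) :
    innerA C ps acc =
      if C ∈ ps.map (fun p => p.sum) then .inl C
      else .inr (acc ++ (ps.map (fun p => p.sum)).filter (fun s => s < C)) := by
  induction ps generalizing acc with
  | nil => simp [innerA]
  | cons p ps ih =>
    simp only [innerA, List.map_cons, List.mem_cons, List.filter_cons]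
    by_cases h1 : p.sum = C
    · simp [h1]
    · by_cases h2 : p.sum < C
      · simp [h1, h2, ih, Ne.symm h1]
      · simp [h1, h2, ih, Ne.symm h1]

lemma outerA_eq (ws : List Int) (C : Int) (k : Nat) : ∀ (c0 : Nat) (acc : List Int),
    outerA ws C c0 k acc =
      if C ∈ sumsFrom ws c0 k then .inl C
      else .inr (acc ++ (sumsFrom ws c0 k).filter (fun s => s < C)) := by
  induction k with
  | zero => intro c0 acc; simp [outerA, sumsFrom]
  | succ k ih =>
    intro c0 acc
    have hsum : sumsFrom ws c0 (k+1) =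
        ((PySem.List.permutations ws c0).map (fun p => p.sum)) ++ sumsFrom ws (c0+1) k := by
      simp [sumsFrom, List.range'_succ]
    rw [hsum]
    simp only [outerA, innerA_eq]
    by_cases h1 : C ∈ (PySem.List.permutations ws c0).map (fun p => p.sum)
    · simp [h1]
    · simp only [h1, if_false]
      rw [ih]
      by_cases h2 : C ∈ sumsFrom ws (c0+1) k
      · simp [h1, h2]
      · simp [h1, h2, List.filter_append, List.append_assoc]

-- any permutation of permutations xs r stays one after consing a new element in front
lemma perms_mono {x : Int} : ∀ (r : Nat) (xs p : List Int),
    p ∈ PySem.List.permutations xs r → p ∈ PySem.List.permutations (x :: xs) r := by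
  intro r
  induction r with
  | zero => intro xs p h; simpa [PySem.List.permutations_zero] using h
  | succ r ih =>
    intro xs p h
    rw [PySem.List.permutations_succ] at h
    simp only [List.mem_flatMap, List.mem_range] at h
    obtain ⟨i, hi, hmem⟩ := h
    rcases hx : xs[i]? with _ | y
    · simp [hx] at hmem
    · simp only [hx, List.mem_map] at hmem
      obtain ⟨q, hq, rfl⟩ := hmem
      rw [PySem.List.permutations_succ]
      simp only [List.mem_flatMap, List.mem_range]
      refine ⟨i + 1, by simp; omega, ?_⟩
      have : (x :: xs)[i+1]? = some y := by simpa using hx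
      simp only [this, List.mem_map]
      exact ⟨q, by simpa [List.eraseIdx_cons_succ] using ih _ q hq, rfl⟩

-- every sublist occurs among the permutations of its length (indices taken in increasing order)
lemma mem_perms_of_sublist : ∀ {sub ws : List Int}, List.Sublist sub ws →
    sub ∈ PySem.List.permutations ws sub.length := by
  intro sub ws h
  induction h with
  | slnil => simp [PySem.List.permutations_zero]
  | cons a h ih => exact perms_mono _ _ _ ih
  | @cons₂ l₁ l₂ a h ih =>
    rw [List.length_cons, PySem.List.permutations_succ]
    simp only [List.mem_flatMap, List.mem_range]
    refine ⟨0, by simp, ?_⟩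
    simp only [List.getElem?_cons_zero, List.eraseIdx_cons_zero, List.mem_map]
    exact ⟨l₁, ih, rfl⟩

-- membership in A's flat sum list = being a sublist sum
lemma mem_sumsA_iff (ws : List Int) (x : Int) :
    x ∈ sumsFrom ws 0 (ws.length + 1) ↔ ∃ sub, List.Sublist sub ws ∧ x = sub.sum := by
  constructor
  · intro h
    simp only [sumsFrom, List.mem_flatMap, List.mem_range', List.mem_map] at h
    obtain ⟨j, _, p, hp, rfl⟩ := h
    obtain ⟨_, rest, hperm⟩ := PySem.List.exists_perm_of_mem_permutations j ws p hp
    have hsp : List.Subperm p ws := ((List.sublist_append_left p rest).subperm).trans hperm.subperm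
    obtain ⟨l, hl, hls⟩ := hsp
    exact ⟨l, hls, (hl.sum_eq).symm⟩
  · rintro ⟨sub, hsub, rfl⟩
    simp only [sumsFrom, List.mem_flatMap, List.mem_range', List.mem_map]
    exact ⟨sub.length, ⟨sub.length, by have := hsub.length_le; omega, by omega⟩,
      sub, mem_perms_of_sublist hsub, rfl⟩

-- membership in B's reachable-sums set = being a sublist sum
lemma mem_reach_aux (ws : List Int) : ∀ (s : List Int) (x : Int),
    x ∈ ws.foldl (fun s w => PySem.Set.union s (s.map (fun x => x + w))) s ↔
      ∃ a ∈ s, ∃ sub, List.Sublist sub ws ∧ x = a + sub.sum := by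
  induction ws with
  | nil => intro s x; simp
  | cons w ws ih =>
    intro s x
    rw [List.foldl_cons, ih]
    constructor
    · rintro ⟨a, ha, sub, hsub, rfl⟩
      rw [PySem.Set.mem_union] at ha
      rcases ha with ha | ha
      · exact ⟨a, ha, sub, (hsub.cons w), rfl⟩
      · simp only [List.mem_map] at ha
        obtain ⟨b, hb, rfl⟩ := ha
        exact ⟨b, hb, w :: sub, hsub.cons₂ w, by simp; ring⟩
    · rintro ⟨a, ha, sub, hsub, rfl⟩
      rcases List.sublist_cons_iff.mp hsub with h | ⟨t, rfl, ht⟩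
      · exact ⟨a, by rw [PySem.Set.mem_union]; exact Or.inl ha, sub, h, rfl⟩
      · refine ⟨a + w, ?_, t, ht, by simp; ring⟩
        rw [PySem.Set.mem_union]
        exact Or.inr (by simp only [List.mem_map]; exact ⟨a, ha, rfl⟩)

lemma mem_reach_iff (ws : List Int) (x : Int) :
    x ∈ ws.foldl (fun s w => PySem.Set.union s (s.map (fun x => x + w))) (PySem.Set.ofList [0]) ↔
      ∃ sub, List.Sublist sub ws ∧ x = sub.sum := by
  rw [mem_reach_aux]
  constructor
  · rintro ⟨a, ha, sub, hsub, rfl⟩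
    have : a = 0 := by simpa [PySem.Set.ofList] using ha
    exact ⟨sub, hsub, by simp [this]⟩
  · rintro ⟨sub, hsub, rfl⟩
    exact ⟨0, by simp [PySem.Set.ofList], sub, hsub, by simp⟩

-- two nonempty lists with the same members have the same Python max
lemma max?_congr {xs ys : List Int} (hm : ∀ x : Int, x ∈ xs ↔ x ∈ ys) (hne : xs ≠ []) :
    PySem.List.max? xs (fun x => x) = PySem.List.max? ys (fun x => x) := by
  have hne' : ys ≠ [] := by
    intro h; subst h
    rcases List.exists_mem_of_ne_nil xs hne with ⟨x, hx⟩
    simpa using (hm x).mp hx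
  rcases hx : PySem.List.max? xs (fun x => x) with _ | m
  · exact absurd ((PySem.List.max?_eq_none_iff xs _).mp hx) hne
  rcases hy : PySem.List.max? ys (fun x => x) with _ | m'
  · exact absurd ((PySem.List.max?_eq_none_iff ys _).mp hy) hne'
  have h1 : m ≤ m' := PySem.List.max?_isMax hy m ((hm m).mp (PySem.List.max?_mem hx))
  have h2 : m' ≤ m := PySem.List.max?_isMax hx m' ((hm m').mpr (PySem.List.max?_mem hy))
  simp [le_antisymm h1 h2]

-- ===== VERDICT (by name: the statement is the Claim_ definition above) =====
theorem weightCapacity_spec : Claim_equal_weightCapacity := by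
  intro ws C _ hpre
  unfold Spec_weightCapacity weightCapacity weightCapacity_alt
  rw [outerA_eq]
  set R := ws.foldl (fun s w => PySem.Set.union s (s.map (fun x => x + w))) (PySem.Set.ofList [0]) with hR
  have hRmem : ∀ x : Int, x ∈ R ↔ ∃ sub, List.Sublist sub ws ∧ x = sub.sum := by
    intro x; rw [hR]; exact mem_reach_iff ws x
  have hnegsub : List.Sublist (ws.filter (fun w => w < 0)) ws := List.filter_sublist
  by_cases hC : C ∈ sumsFrom ws 0 (ws.length + 1)
  · -- A returns C; B's max over sums ≤ C is C as well
    simp only [hC, if_true]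
    have hCR : C ∈ R.filter (fun x => decide (x ≤ C)) := by
      rw [List.mem_filter]
      exact ⟨(hRmem C).mpr ((mem_sumsA_iff ws C).mp hC), by simp⟩
    rcases hy : PySem.List.max? (R.filter (fun x => decide (x ≤ C))) (fun x => x) with _ | m
    · rw [PySem.List.max?_eq_none_iff] at hy
      rw [hy] at hCR; simp at hCR
    · have h1 : m ≤ C := by
        have := List.mem_filter.mp (PySem.List.max?_mem hy)
        simpa using this.2
      have h2 : C ≤ m := PySem.List.max?_isMax hy C hCR
      simp [le_antisymm h1 h2]
  · -- A returns max of sums < C; same set of values as B's sums ≤ C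
    simp only [hC, if_false, List.nil_append]
    have hmem : ∀ x : Int, x ∈ (sumsFrom ws 0 (ws.length + 1)).filter (fun s => s < C) ↔
        x ∈ R.filter (fun x => decide (x ≤ C)) := by
      intro x
      simp only [List.mem_filter, mem_sumsA_iff, hRmem, decide_eq_true_eq]
      constructor
      · rintro ⟨h, hlt⟩; exact ⟨h, le_of_lt hlt⟩
      · rintro ⟨h, hle⟩
        refine ⟨h, lt_of_le_of_ne hle ?_⟩
        intro hxC; subst hxC
        exact hC ((mem_sumsA_iff ws x).mpr h)
    have hne : (sumsFrom ws 0 (ws.length + 1)).filter (fun s => s < C) ≠ [] := by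
      have hmemneg : (ws.filter (fun w => w < 0)).sum ∈ sumsFrom ws 0 (ws.length + 1) :=
        (mem_sumsA_iff ws _).mpr ⟨_, hnegsub, rfl⟩
      have hlt : (ws.filter (fun w => w < 0)).sum < C := by
        rcases lt_or_eq_of_le hpre with h | h
        · exact h
        · exact absurd (h ▸ hmemneg) hC
      intro h
      have : (ws.filter (fun w => w < 0)).sum ∈ (sumsFrom ws 0 (ws.length + 1)).filter (fun s => s < C) := by
        rw [List.mem_filter]; exact ⟨hmemneg, by simpa using hlt⟩
      rw [h] at this; simp at this
    rw [max?_congr hmem hne]
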